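-- pv_equiv track=rewrite | github.com/SOURADEEP-DONNY/WORKING-WITH-PYTHON | FUNCTION/aa.py | func
-- ===== SOURCE A (Python) =====
-- import collections
--
-- def func(li, n):
-- 	res = collections.deque([])
-- 	li.sort()
-- 	res.append(li[0])
-- 	for i in range(1, n):
-- 		f = res[0]
--
-- 		if(li[i] >= 2 * f ):
--
-- 			res.popleft()
--
-- 		res.append(li[i])
--
-- 	return len(res)
-- ===== SOURCE B (Python) =====
-- def func(li, n):
--     li.sort()
--     if n <= 1:
--         return 1
--     matches = 0
--     pos = 0
--     while True:
--         target = 2 * li[matches]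
--         lo, hi = 0, n
--         while lo < hi:
--             mid = (lo + hi) // 2
--             if li[mid] >= target:
--                 hi = mid
--             else:
--                 lo = mid + 1
--         nxt = pos + 1 if pos + 1 > lo else lo
--         if nxt >= n:
--             return n - matches
--         matches += 1
--         pos = nxt
-- ===== Notes on version B (the rewrite author's own statement) =====
-- stated objective: alternative
-- what changed: Replaces A's deque-based element-by-element sweep with a different mechanism: after sorting, each match locates the next pairable element directly via a hand-written binary search over the sorted prefix (jumping the 'next position' pointer), instead of scanning every element and shifting a window container.
import Mathlib
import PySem

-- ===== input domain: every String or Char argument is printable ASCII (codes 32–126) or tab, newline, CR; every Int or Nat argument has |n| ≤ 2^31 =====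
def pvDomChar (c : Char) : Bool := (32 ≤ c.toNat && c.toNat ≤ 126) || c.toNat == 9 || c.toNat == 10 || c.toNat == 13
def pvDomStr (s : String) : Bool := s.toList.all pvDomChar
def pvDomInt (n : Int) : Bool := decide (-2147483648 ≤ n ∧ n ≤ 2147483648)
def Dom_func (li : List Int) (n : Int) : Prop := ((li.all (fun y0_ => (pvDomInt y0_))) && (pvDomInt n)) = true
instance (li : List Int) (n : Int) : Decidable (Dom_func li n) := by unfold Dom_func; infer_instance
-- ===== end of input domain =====

-- B replaces A's per-element deque scan by binary-search jumps on the sorted list: each match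
-- locates the next pairable element with a hand-written binary search instead of stepping the
-- window one element at a time (objective: alternative). Both A and B sort `li` in place;
-- the theorems are about the return value.


-- ===== PORT A =====
-- deque modelled as a list: res[0] = headD, popleft = tail, append = ++ [·]
def func (li : List Int) (n : Int) : Int :=
  let s := PySem.List.sorted li id
  let res : List Int := [PySem.List.pyGetD s 0 0]
  let res := (PySem.List.pyRange 1 n).foldl (fun res i =>
      let f := res.headD 0
      let res := if PySem.List.pyGetD s i 0 ≥ 2 * f then res.tail else res
      res ++ [PySem.List.pyGetD s i 0]) res
  (res.length : Int)

-- ===== PORT B =====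
-- B's inner `while lo < hi` binary search, transliterated
def bsLoop (s : List Int) (t lo hi : Int) : Int :=
  if h : lo < hi then
    let mid := PySem.Int.floordiv (lo + hi) 2
    if PySem.List.pyGetD s mid 0 ≥ t then bsLoop s t lo mid
    else bsLoop s t (mid + 1) hi
  else lo
termination_by (hi - lo).toNat
decreasing_by
  · have h1 : lo ≤ PySem.Int.floordiv (lo + hi) 2 :=
      (PySem.Int.le_floordiv_iff_mul_le (by omega)).mpr (by omega)
    have h2 : PySem.Int.floordiv (lo + hi) 2 < hi :=
      (PySem.Int.floordiv_lt_iff_lt_mul (by omega)).mpr (by omega)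
    omega
  · have h1 : lo ≤ PySem.Int.floordiv (lo + hi) 2 :=
      (PySem.Int.le_floordiv_iff_mul_le (by omega)).mpr (by omega)
    have h2 : PySem.Int.floordiv (lo + hi) 2 < hi :=
      (PySem.Int.floordiv_lt_iff_lt_mul (by omega)).mpr (by omega)
    omega

-- B's outer `while True` loop, transliterated (returns the final `n - matches`)
def outerLoop (s : List Int) (n m pos : Int) : Int :=
  let t := 2 * PySem.List.pyGetD s m 0
  let lo := bsLoop s t 0 n
  let nxt := if pos + 1 > lo then pos + 1 else lo
  if h : nxt ≥ n then n - m
  else outerLoop s n (m + 1) nxt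
termination_by (n - pos).toNat
decreasing_by
  simp only [nxt, lo, t, not_le] at h ⊢
  split at h <;> split <;> omega

def func_alt (li : List Int) (n : Int) : Int :=
  let s := PySem.List.sorted li id
  if n ≤ 1 then 1
  else outerLoop s n 0 0

-- ===== PRECONDITION & SPEC =====
-- Pre_ excludes exactly the inputs where A raises IndexError: an empty list (li[0]) or
-- n exceeding len(li) (li[i] in the loop).
def Pre_func (li : List Int) (n : Int) : Prop := li ≠ [] ∧ n ≤ (li.length : Int)
instance (li : List Int) (n : Int) : Decidable (Pre_func li n) := by unfold Pre_func; infer_instance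
def pvWitness_func : List Int × Int := ([3, 1, 2], 3)

def Spec_func (li : List Int) (n : Int) (out : Int) : Prop := out = func_alt li n
instance (li : List Int) (n : Int) (out : Int) : Decidable (Spec_func li n out) := by unfold Spec_func; infer_instance

-- ===== CLAIM (what is proved, stated in full; the proofs are below) =====
def Claim_equal_func : Prop := ∀ (li : List Int) (n : Int), Dom_func li n → Pre_func li n → Spec_func li n (func li n)

-- ===== LEMMAS AND PROOFS =====

-- Joint invariant of A's deque fold and the reference index fold over range(1, 1+k):
-- the index fold's accumulator is a Nat l ≤ k, and A's deque is exactly the slice s[l : k+1].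
lemma loop_inv (s : List Int) (k : Nat) (hs : s ≠ []) (hk : (1 : Int) + k ≤ (s.length : Int)) :
    ∃ l : Nat, l ≤ k ∧
      ((PySem.List.pyRange 1 (1 + (k : Int))).foldl (fun left i =>
          if PySem.List.pyGetD s i 0 ≥ 2 * PySem.List.pyGetD s left 0 then left + 1 else left) 0
        = (l : Int)) ∧
      ((PySem.List.pyRange 1 (1 + (k : Int))).foldl (fun res i =>
          let f := res.headD 0
          let res := if PySem.List.pyGetD s i 0 ≥ 2 * f then res.tail else res
          res ++ [PySem.List.pyGetD s i 0]) [PySem.List.pyGetD s 0 0]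
        = (s.take (k + 1)).drop l) := by
  induction k with
  | zero =>
    refine ⟨0, le_refl 0, ?_, ?_⟩ <;>
      rw [show ((1:Int) + (0:Nat) = 1) by norm_num, PySem.List.pyRange_one_eq_nil (le_refl 1)]
    · rfl
    · have h0 : (0:Int) < (s.length : Int) := by
        cases s with
        | nil => exact absurd rfl hs
        | cons a t => simp
      rw [PySem.List.pyGetD_eq_getElem s 0 (le_refl 0) h0]
      cases s with
      | nil => exact absurd rfl hs
      | cons a t => simp
  | succ k ih =>
    obtain ⟨l, hl, hB, hA⟩ := ih (by push_cast at hk ⊢; omega)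
    have hrange : PySem.List.pyRange 1 (1 + ((k+1 : Nat) : Int)) =
        PySem.List.pyRange 1 (1 + (k : Int)) ++ [1 + (k : Int)] := by
      have : (1 : Int) + ((k+1 : Nat) : Int) = (1 + (k : Int)) + 1 := by push_cast; ring
      rw [this, PySem.List.pyRange_one_succ_right (by omega)]
    have hidx_lt : ((k+1 : Nat) : Int) < (s.length : Int) := by push_cast at hk ⊢; omega
    have hkl : k + 1 < s.length := by exact_mod_cast hidx_lt
    have hll : l < s.length := by omega
    have hgetI : PySem.List.pyGetD s (1 + (k : Int)) 0 = s[k+1] := by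
      rw [PySem.List.pyGetD_eq_getElem s 0 (by omega) (by omega)]
      congr 1
      omega
    have hgetL : PySem.List.pyGetD s ((l : Nat) : Int) 0 = s[l] := by
      rw [PySem.List.pyGetD_eq_getElem s 0 (by omega) (by exact_mod_cast hll)]
      simp
    have hhead : ((s.take (k + 1)).drop l).headD 0 = s[l] := by
      rw [List.headD_eq_head?, List.head?_drop, List.getElem?_take]
      simp [Nat.lt_succ_of_le hl, List.getElem?_eq_getElem (by omega : l < s.length)]
    have htake : s.take (k + 1 + 1) = s.take (k + 1) ++ [s[k+1]] := by
      rw [List.take_add_one]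
      simp [List.getElem?_eq_getElem hkl]
    by_cases hc : s[k+1] ≥ 2 * s[l]
    · refine ⟨l + 1, by omega, ?_, ?_⟩
      · rw [hrange, List.foldl_append, hB]
        simp only [List.foldl_cons, List.foldl_nil, hgetI, hgetL, if_pos hc]
        push_cast
        ring
      · rw [hrange, List.foldl_append, hA]
        simp only [List.foldl_cons, List.foldl_nil, hhead, hgetI, if_pos hc]
        rw [List.tail_drop, htake,
          List.drop_append_of_le_length (by rw [List.length_take]; omega)]
    · refine ⟨l, by omega, ?_, ?_⟩
      · rw [hrange, List.foldl_append, hB]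
        simp only [List.foldl_cons, List.foldl_nil, hgetI, hgetL, if_neg hc]
      · rw [hrange, List.foldl_append, hA]
        simp only [List.foldl_cons, List.foldl_nil, hhead, hgetI, if_neg hc]
        rw [htake, List.drop_append_of_le_length (by rw [List.length_take]; omega)]

-- the index fold is the identity on a segment where the condition fails throughout
lemma fold_id_of_lt (s : List Int) (l : Int) (L : List Int)
    (h : ∀ i ∈ L, ¬ (PySem.List.pyGetD s i 0 ≥ 2 * PySem.List.pyGetD s l 0)) :
    L.foldl (fun left i =>
      if PySem.List.pyGetD s i 0 ≥ 2 * PySem.List.pyGetD s left 0 then left + 1 else left) l = l := by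
  induction L with
  | nil => rfl
  | cons a L ih =>
    simp only [List.foldl_cons, if_neg (h a (List.mem_cons_self))]
    exact ih (fun i hi => h i (List.mem_cons_of_mem a hi))

-- correctness of B's binary search: the result separates values < t from values ≥ t
lemma bsLoop_inv (s : List Int) (t n : Int)
    (hmono : ∀ i j : Int, 0 ≤ i → i ≤ j → j < n →
      PySem.List.pyGetD s i 0 ≤ PySem.List.pyGetD s j 0) :
    ∀ (k : Nat) (lo hi : Int), (hi - lo).toNat ≤ k → 0 ≤ lo → lo ≤ hi → hi ≤ n →
    (∀ i, 0 ≤ i → i < lo → PySem.List.pyGetD s i 0 < t) →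
    (∀ i, hi ≤ i → i < n → t ≤ PySem.List.pyGetD s i 0) →
    lo ≤ bsLoop s t lo hi ∧ bsLoop s t lo hi ≤ hi ∧
    (∀ i, 0 ≤ i → i < bsLoop s t lo hi → PySem.List.pyGetD s i 0 < t) ∧
    (∀ i, bsLoop s t lo hi ≤ i → i < n → t ≤ PySem.List.pyGetD s i 0) := by
  intro k
  induction k with
  | zero =>
    intro lo hi hk h0 hlh hhn hlow hhigh
    have heq : lo = hi := by omega
    rw [bsLoop, dif_neg (by omega)]
    exact ⟨le_refl lo, by omega, hlow, fun i h1 h2 => hhigh i (by omega) h2⟩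
  | succ k ih =>
    intro lo hi hk h0 hlh hhn hlow hhigh
    by_cases h : lo < hi
    · rw [bsLoop, dif_pos h]
      have h1 : lo ≤ PySem.Int.floordiv (lo + hi) 2 :=
        (PySem.Int.le_floordiv_iff_mul_le (by omega)).mpr (by omega)
      have h2 : PySem.Int.floordiv (lo + hi) 2 < hi :=
        (PySem.Int.floordiv_lt_iff_lt_mul (by omega)).mpr (by omega)
      set mid := PySem.Int.floordiv (lo + hi) 2 with hmid
      by_cases hc : PySem.List.pyGetD s mid 0 ≥ t
      · rw [if_pos hc]
        have := ih lo mid (by omega) h0 (by omega) (by omega) hlow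
          (fun i hmi hin => le_trans hc (hmono mid i (by omega) hmi hin))
        exact ⟨this.1, by omega, this.2.2⟩
      · rw [if_neg hc]
        push_neg at hc
        have := ih (mid + 1) hi (by omega) (by omega) (by omega) hhn
          (fun i hi0 him => by
            by_cases hil : i < lo
            · exact hlow i hi0 hil
            · exact lt_of_le_of_lt (hmono i mid hi0 (by omega) (by omega)) hc) hhigh
        exact ⟨by omega, this.2.1, this.2.2⟩
    · rw [bsLoop, dif_neg h]
      have heq : lo = hi := by omega
      exact ⟨le_refl lo, by omega, hlow, fun i h1 h2 => hhigh i (by omega) h2⟩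

-- the reference index fold over range(p+1, n) equals B's outer loop from (matches, pos) = (l, p)
lemma fold_eq_outer (s : List Int) (n : Int)
    (hmono : ∀ i j : Int, 0 ≤ i → i ≤ j → j < n →
      PySem.List.pyGetD s i 0 ≤ PySem.List.pyGetD s j 0) :
    ∀ (k : Nat) (l p : Int), (n - p).toNat ≤ k → 0 ≤ l → l ≤ p →
    outerLoop s n l p = n -
      ((PySem.List.pyRange (p+1) n).foldl (fun left i =>
        if PySem.List.pyGetD s i 0 ≥ 2 * PySem.List.pyGetD s left 0 then left + 1 else left) l) := by
  intro k
  induction k with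
  | zero =>
    intro l p hk h0 hlp
    have hpn : n ≤ p := by omega
    rw [PySem.List.pyRange_one_eq_nil (by omega), List.foldl_nil]
    rw [outerLoop.eq_def]; simp only []
    rw [dif_pos (by split <;> omega)]
  | succ k ih =>
    intro l p hk h0 hlp
    rw [outerLoop.eq_def]; simp only []
    set t := 2 * PySem.List.pyGetD s l 0 with ht
    by_cases hpn : n ≤ p
    · rw [PySem.List.pyRange_one_eq_nil (by omega), List.foldl_nil]
      rw [dif_pos (by split <;> omega)]
    · push_neg at hpn
      have hbs := bsLoop_inv s t n hmono ((n - 0).toNat) 0 n (le_refl _)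
        (le_refl 0) (by omega) (le_refl n) (by omega) (by omega)
      set r := bsLoop s t 0 n with hr
      set nxt := if p + 1 > r then p + 1 else r with hnxt
      have hnp : p + 1 ≤ nxt := by rw [hnxt]; split <;> omega
      have hnr : r ≤ nxt := by rw [hnxt]; split <;> omega
      have hseg : ∀ i ∈ PySem.List.pyRange (p+1) (min nxt n), ¬ (PySem.List.pyGetD s i 0 ≥ t) := by
        intro i hi
        have := PySem.List.mem_pyRange_one.mp hi
        have hir : i < r := by
          rw [hnxt] at this
          by_cases hc : p + 1 > r
          · simp only [if_pos hc] at this; omega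
          · simp only [if_neg hc] at this; omega
        exact not_le.mpr (hbs.2.2.1 i (by omega) hir)
      by_cases hstop : nxt ≥ n
      · rw [dif_pos hstop]
        have hmin : min nxt n = n := by omega
        rw [hmin] at hseg
        rw [fold_id_of_lt s l _ hseg]
      · rw [dif_neg hstop]
        push_neg at hstop
        have hmin : min nxt n = nxt := by omega
        rw [hmin] at hseg
        have hsplit : PySem.List.pyRange (p+1) n =
            PySem.List.pyRange (p+1) nxt ++ PySem.List.pyRange nxt n :=
          PySem.List.pyRange_one_append _ _ _ (by omega) (by omega)
        rw [hsplit, List.foldl_append, fold_id_of_lt s l _ hseg,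
          PySem.List.pyRange_one_cons (by omega : nxt < n), List.foldl_cons]
        have hcond : PySem.List.pyGetD s nxt 0 ≥ t :=
          hbs.2.2.2 nxt (by omega) (by omega)
        rw [if_pos hcond]
        exact ih (l + 1) nxt (by omega) (by omega) (by omega)

-- monotonicity of indexed reads of the sorted list
lemma sorted_mono (li : List Int) (n : Int) (hn : n ≤ ((PySem.List.sorted li id).length : Int)) :
    ∀ i j : Int, 0 ≤ i → i ≤ j → j < n →
      PySem.List.pyGetD (PySem.List.sorted li id) i 0 ≤
      PySem.List.pyGetD (PySem.List.sorted li id) j 0 := by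
  intro i j hi hij hjn
  set s := PySem.List.sorted li id with hs
  have hjlen : j < (s.length : Int) := by omega
  have hjl : j.toNat < s.length := by omega
  have hil : i.toNat < s.length := by omega
  have hpw : s.Pairwise (fun a b => id a ≤ id b) := PySem.List.sorted_pairwise li id
  have key : s[i.toNat]'hil ≤ s[j.toNat]'hjl := by
    rcases eq_or_lt_of_le (show i.toNat ≤ j.toNat by omega) with heq | hlt
    · exact le_of_eq (by congr 1)
    · exact List.pairwise_iff_getElem.mp hpw i.toNat j.toNat hil hjl hlt
  calc PySem.List.pyGetD s i 0 = s[i.toNat]'hil :=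
        PySem.List.pyGetD_eq_getElem s 0 hi (by omega)
    _ ≤ s[j.toNat]'hjl := key
    _ = PySem.List.pyGetD s j 0 :=
        (PySem.List.pyGetD_eq_getElem s 0 (by omega) hjlen).symm

theorem func_spec : Claim_equal_func := by
  intro li n _ hpre
  obtain ⟨hne, hlen⟩ := hpre
  unfold Spec_func func func_alt
  simp only []
  set s := PySem.List.sorted li id with hsdef
  have hslen : s.length = li.length := PySem.List.length_sorted li id false
  have hsne : s ≠ [] := by
    intro h
    apply hne
    have := hslen
    rw [h] at this
    exact List.eq_nil_of_length_eq_zero this.symm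
  have hnlen : n ≤ (s.length : Int) := by rw [hslen]; exact hlen
  by_cases hn : n ≤ 1
  · rw [PySem.List.pyRange_one_eq_nil hn, if_pos hn]
    rfl
  · push_neg at hn
    rw [if_neg (by omega)]
    set k : Nat := (n - 1).toNat with hkdef
    have hnk : n = 1 + (k : Int) := by omega
    have hk : (1 : Int) + (k : Nat) ≤ (s.length : Int) := by omega
    obtain ⟨l, hl, hB, hA⟩ := loop_inv s k hsne hk
    have hmono := sorted_mono li n hnlen
    have houter := fold_eq_outer s n hmono (n - 0).toNat 0 0 (le_refl _)
      (le_refl 0) (le_refl 0)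
    rw [show (0:Int) + 1 = 1 by ring] at houter
    rw [hnk] at houter ⊢
    rw [hA, houter, hB]
    rw [List.length_drop, List.length_take]
    have hk1 : k + 1 ≤ s.length := by omega
    omega
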